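-- pv_equiv track=rewrite | github.com/TGO74/boilerplate-rock-paper-scissors | RPS.py | predictor_pattern
-- ===== SOURCE A (Python) =====
-- def predictor_last(opp_history):
--     return opp_history[-1] if opp_history else "R"
--
-- def predictor_pattern(opp_history):
--     n = len(opp_history)
--     for length in range(n-1, 0, -1):
--         suffix = opp_history[-length:]
--         for i in range(n - length):
--             if opp_history[i:i+length] == suffix:
--                 if i+length < n:
--                     return opp_history[i+length]
--     return predictor_last(opp_history)
-- ===== SOURCE B (Python) =====
-- def predictor_pattern(opp_history):
--     n = len(opp_history)
--     if n == 0: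
--         return "R"
--     r = opp_history[::-1]
--     best_len = 0
--     best_j = 0
--     for j in range(1, n):
--         k = 0
--         while j + k < n and r[k] == r[j + k]:
--             k += 1
--         if k > 0 and k >= best_len:
--             best_len = k
--             best_j = j
--     if best_len == 0:
--         return opp_history[-1]
--     return opp_history[n - best_j]
-- ===== Notes on version B (the rewrite author's own statement) =====
-- stated objective: faster
-- what changed: Replaces the triple-nested scan (every suffix length, every start, O(n) slice comparison) by a single quadratic pass over the reversed string that counts character-match lengths (naive z-values) and keeps the best (longest, earliest-start) repeat.
import Mathlib
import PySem

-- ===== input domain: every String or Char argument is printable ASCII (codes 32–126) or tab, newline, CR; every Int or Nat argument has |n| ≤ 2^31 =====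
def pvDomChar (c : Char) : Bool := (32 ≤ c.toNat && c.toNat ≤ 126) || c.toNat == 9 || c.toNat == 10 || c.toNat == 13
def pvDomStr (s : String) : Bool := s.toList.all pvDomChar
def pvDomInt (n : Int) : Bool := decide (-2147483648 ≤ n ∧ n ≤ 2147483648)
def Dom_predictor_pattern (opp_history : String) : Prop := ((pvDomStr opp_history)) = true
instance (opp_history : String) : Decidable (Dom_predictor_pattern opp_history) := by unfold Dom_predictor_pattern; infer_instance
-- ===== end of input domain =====

-- B replaces A's cubic longest-repeated-suffix scan (all lengths × all starts × slice compare) by one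
-- quadratic pass of direct character-match counts on the reversed string; return values are identical.

-- ===== PORT A =====
-- predictor_last: opp_history[-1] if opp_history else "R"  (pyGet? is none exactly on the empty string)
def predictor_last (opp_history : String) : String :=
  match PySem.Str.pyGet? opp_history (-1) with
  | some c => String.ofList [c]
  | none => "R"

def predictor_pattern (opp_history : String) : String :=
  let s := opp_history.toList
  let n : Int := s.length
  match (PySem.List.pyRange (n - 1) 0 (-1)).findSome? (fun length =>
      let suffix := PySem.List.slice s (some (-length)) none
      (PySem.List.pyRange 0 (n - length) 1).findSome? (fun i =>
        if PySem.List.slice s (some i) (some (i + length)) = suffix ∧ i + length < n then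
          (PySem.List.pyGet? s (i + length)).map (fun c => String.ofList [c])
        else none)) with
  | some r => r
  | none => predictor_last opp_history

-- ===== PORT B =====
-- the inner while loop of Source B: while j + k < n and r[k] == r[j + k]: k += 1
def pvZscan (r : List Char) (n : Int) (j : Int) (k : Int) : Int :=
  if h : j + k < n ∧ PySem.List.pyGet? r k = PySem.List.pyGet? r (j + k) then
    pvZscan r n j (k + 1)
  else k
termination_by (n - (j + k)).toNat
decreasing_by
  have := h.1
  omega

def predictor_pattern_alt (opp_history : String) : String :=
  let s := opp_history.toList
  let n : Int := s.length
  if n = 0 then "R"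
  else
    -- r = opp_history[::-1] (reverse; PySem.List.slice?_none_none_neg_one)
    let r := s.reverse
    let best := (PySem.List.pyRange 1 n 1).foldl
      (fun (st : Int × Int) j =>
        let k := pvZscan r n j 0
        if 0 < k ∧ st.1 ≤ k then (k, j) else st) (0, 0)
    if best.1 = 0 then
      match PySem.List.pyGet? s (-1) with
      | some c => String.ofList [c]
      | none => "R"   -- unreachable: n ≠ 0
    else
      match PySem.List.pyGet? s (n - best.2) with
      | some c => String.ofList [c]
      | none => "R"   -- unreachable: 1 ≤ best.2 ≤ n - 1

-- ===== PRECONDITION & SPEC =====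
def Spec_predictor_pattern (opp_history : String) (out : String) : Prop := out = predictor_pattern_alt opp_history
instance (opp_history : String) (out : String) : Decidable (Spec_predictor_pattern opp_history out) := by unfold Spec_predictor_pattern; infer_instance

-- ===== CLAIM (what is proved, stated in full; the proofs are below) =====
def Claim_equal_predictor_pattern : Prop := ∀ (opp_history : String), Dom_predictor_pattern opp_history → Spec_predictor_pattern opp_history (predictor_pattern opp_history)

-- ===== LEMMAS AND PROOFS =====

-- length of the longest common prefix of two lists
def pvLcp : List Char → List Char → Nat
  | a :: as, b :: bs => if a = b then pvLcp as bs + 1 else 0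
  | _, _ => 0

-- z-value: longest common prefix of rl.drop j with rl
def pvZ (rl : List Char) (j : Nat) : Nat := pvLcp (rl.drop j) rl

-- invariant of B's fold after processing j = 1..m: state (0,0) while all z-values are 0, else
-- (B, J) with B the maximum z-value on [1, m] and J the largest index attaining it
def pvInv (rl : List Char) (m : Nat) (st : Int × Int) : Prop :=
  (st = (0, 0) ∧ ∀ j, 1 ≤ j → j ≤ m → pvZ rl j = 0) ∨
  (∃ B J : Nat, st = ((B : Int), (J : Int)) ∧ 1 ≤ B ∧ 1 ≤ J ∧ J ≤ m ∧ pvZ rl J = B ∧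
    (∀ j, 1 ≤ j → j ≤ m → pvZ rl j ≤ B) ∧ (∀ j, J < j → j ≤ m → pvZ rl j < B))

theorem pvLcp_le_left (x y : List Char) : pvLcp x y ≤ x.length := by
  induction x generalizing y with
  | nil => simp [pvLcp]
  | cons a as ih =>
    cases y with
    | nil => simp [pvLcp]
    | cons b bs =>
      simp only [pvLcp]
      split
      · exact Nat.succ_le_succ (ih bs)
      · simp

theorem pvLcp_take_iff (L : Nat) (x y : List Char) (hx : L ≤ x.length) :
    L ≤ pvLcp x y ↔ x.take L = y.take L := by
  induction L generalizing x y with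
  | zero => simp
  | succ m ih =>
    cases x with
    | nil => simp at hx
    | cons a as =>
      cases y with
      | nil =>
        simp only [pvLcp, List.take_cons, List.take_nil]
        constructor
        · omega
        · intro h; simp at h
      | cons b bs =>
        simp only [pvLcp, List.take_cons, List.cons.injEq]
        by_cases hab : a = b
        · simp only [hab, if_true, List.take_succ_cons, List.cons.injEq, true_and]
          rw [show pvLcp as bs + 1 = (pvLcp as bs).succ from rfl, Nat.succ_le_succ_iff]
          exact ih as bs (by simpa using hx)
        · simp [hab]

theorem pvZscan_eq (rl : List Char) (j : Nat) :
    ∀ (d : Nat) (k : Nat), rl.length - (j + k) = d →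
    pvZscan rl rl.length j k = (k : Int) + (pvLcp (rl.drop (j + k)) (rl.drop k) : Int) := by
  intro d
  induction d with
  | zero =>
    intro k hd
    -- j + k ≥ length: drop (j+k) = []
    rw [pvZscan]
    have hge : rl.length ≤ j + k := by omega
    have hnil : rl.drop (j + k) = [] := List.drop_eq_nil_of_le hge
    rw [dif_neg]
    · rw [hnil]
      cases rl.drop k <;> simp [pvLcp]
    · push_neg
      intro hlt
      exfalso
      have : (j : Int) + k < rl.length := hlt
      omega
  | succ m ih =>
    intro k hd
    have hlt : j + k < rl.length := by omega
    rw [pvZscan]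
    have hk : k < rl.length := by omega
    have hjk : ((j : Int) + k) = ((j + k : Nat) : Int) := by push_cast; ring
    have hdropk : rl.drop k = rl[k] :: rl.drop (k + 1) := List.drop_eq_getElem_cons hk
    have hdropjk : rl.drop (j + k) = rl[j + k] :: rl.drop (j + k + 1) := List.drop_eq_getElem_cons hlt
    by_cases heq : rl[k] = rl[j + k]
    · rw [dif_pos]
      · have hrec := ih (k + 1) (by omega)
        rw [show ((k : Int) + 1) = ((k + 1 : Nat) : Int) from by push_cast; ring, hrec,
          hdropk, hdropjk]
        simp only [pvLcp, if_pos heq.symm]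
        rw [show j + (k + 1) = j + k + 1 from by omega]
        push_cast
        ring
      · constructor
        · push_cast; omega
        · rw [hjk, PySem.List.pyGet?_natCast, PySem.List.pyGet?_natCast]
          simp [List.getElem?_eq_getElem hk, List.getElem?_eq_getElem hlt, heq]
    · rw [dif_neg]
      · rw [hdropk, hdropjk]
        simp only [pvLcp, if_neg (fun h : rl[j+k] = rl[k] => heq (h.symm))]
        simp
      · push_neg
        intro _
        rw [hjk, PySem.List.pyGet?_natCast, PySem.List.pyGet?_natCast]
        simp [List.getElem?_eq_getElem hk, List.getElem?_eq_getElem hlt]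
        exact heq

theorem pvZscan_zero (rl : List Char) (j : Nat) :
    pvZscan rl rl.length j 0 = (pvZ rl j : Int) := by
  have := pvZscan_eq rl j (rl.length - (j + 0)) 0 rfl
  simpa [pvZ] using this

theorem pvBridge (l : List Char) (i L : Nat) (hL : 1 ≤ L) (hiL : i + L < l.length) :
    ((l.drop i).take L = l.drop (l.length - L)) ↔ L ≤ pvZ l.reverse (l.length - i - L) := by
  set n := l.length with hn
  have h1 : ((l.drop i).take L).reverse = (l.reverse.drop (n - i - L)).take L := by
    rw [List.reverse_take, List.reverse_drop]
    rw [List.length_drop]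
    rw [List.drop_take]
    congr 1
    omega
  have h2 : (l.drop (n - L)).reverse = l.reverse.take L := by
    rw [List.reverse_drop]
    congr 1
    omega
  rw [pvZ, pvLcp_take_iff L _ _ (by simp [List.length_drop]; omega)]
  constructor
  · intro h
    rw [← h1, ← h2, h]
  · intro h
    have := h1.trans (h.trans h2.symm)
    exact List.reverse_injective this

theorem pvRange_desc_nil (a : Int) (h : a ≤ 0) : PySem.List.pyRange a 0 (-1) = [] := by
  simp only [PySem.List.pyRange]
  norm_num
  intro h'
  omega

theorem pvMem_desc : ∀ (d : Nat) (a : Int), a.toNat = d →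
    ∀ x ∈ PySem.List.pyRange a 0 (-1), 1 ≤ x ∧ x ≤ a := by
  intro d
  induction d with
  | zero =>
    intro a hd x hx
    rw [pvRange_desc_nil a (by omega)] at hx
    simp at hx
  | succ m ih =>
    intro a hd x hx
    rw [PySem.List.pyRange_neg_one_cons (by omega)] at hx
    rcases List.mem_cons.mp hx with h | h
    · omega
    · have := ih (a - 1) (by omega) x h
      omega

theorem pvFindSome_asc {β : Type} (f : Int → Option β) (v : β) :
    ∀ (d : Nat) (a b i₀ : Int), (b - a).toNat = d → a ≤ i₀ → i₀ < b →
    (∀ i, a ≤ i → i < i₀ → f i = none) → f i₀ = some v →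
    (PySem.List.pyRange a b 1).findSome? f = some v := by
  intro d
  induction d with
  | zero => intro a b i₀ hd h1 h2 h3 h4; omega
  | succ m ih =>
    intro a b i₀ hd h1 h2 h3 h4
    rw [PySem.List.pyRange_one_cons (by omega), List.findSome?_cons]
    rcases eq_or_lt_of_le h1 with he | hlt
    · rw [show f a = some v from he ▸ h4]
    · rw [h3 a (le_refl a) hlt]
      exact ih (a + 1) b i₀ (by omega) (by omega) h2 (fun i hi1 hi2 => h3 i (by omega) hi2) h4

theorem pvFindSome_desc {β : Type} (f : Int → Option β) (v : β) :
    ∀ (d : Nat) (a L₀ : Int), a.toNat = d → 1 ≤ L₀ → L₀ ≤ a →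
    (∀ L, L₀ < L → L ≤ a → f L = none) → f L₀ = some v →
    (PySem.List.pyRange a 0 (-1)).findSome? f = some v := by
  intro d
  induction d with
  | zero => intro a L₀ hd h1 h2 h3 h4; omega
  | succ m ih =>
    intro a L₀ hd h1 h2 h3 h4
    rw [PySem.List.pyRange_neg_one_cons (by omega), List.findSome?_cons]
    rcases eq_or_lt_of_le h2 with he | hlt
    · rw [show f a = some v from by rw [← he]; exact h4]
    · rw [h3 a hlt (le_refl a)]
      exact ih (a - 1) L₀ (by omega) h1 (by omega) (fun L hL1 hL2 => h3 L hL1 (by omega)) h4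

theorem pvStep (rl : List Char) (j : Nat) (hj : 1 ≤ j) (st : Int × Int)
    (h : pvInv rl (j - 1) st) :
    pvInv rl j (if 0 < pvZscan rl rl.length (j : Int) 0 ∧ st.1 ≤ pvZscan rl rl.length (j : Int) 0
      then (pvZscan rl rl.length (j : Int) 0, (j : Int)) else st) := by
  rw [pvZscan_zero]
  rcases h with ⟨hst, hall⟩ | ⟨B, J, hst, hB, hJ1, hJm, hzJ, hub, hstr⟩
  · subst hst
    by_cases hz : pvZ rl j = 0
    · rw [if_neg (by simp [hz])]
      exact Or.inl ⟨rfl, fun j' h1 h2 => by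
        rcases Nat.lt_or_ge j' j with h' | h'
        · exact hall j' h1 (by omega)
        · have : j' = j := by omega
          rw [this]; exact hz⟩
    · rw [if_pos (by constructor <;> simp <;> omega)]
      refine Or.inr ⟨pvZ rl j, j, rfl, by omega, hj, le_refl j, rfl, ?_, ?_⟩
      · intro j' h1 h2
        rcases Nat.lt_or_ge j' j with h' | h'
        · rw [hall j' h1 (by omega)]; omega
        · have : j' = j := by omega
          rw [this]
      · intro j' h1 h2; omega
  · subst hst
    by_cases hcase : B ≤ pvZ rl j
    · rw [if_pos (by constructor <;> simp <;> omega)]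
      refine Or.inr ⟨pvZ rl j, j, rfl, by omega, hj, le_refl j, rfl, ?_, ?_⟩
      · intro j' h1 h2
        rcases Nat.lt_or_ge j' j with h' | h'
        · have := hub j' h1 (by omega); omega
        · have : j' = j := by omega
          rw [this]
      · intro j' h1 h2; omega
    · rw [if_neg (by simp; intro _; exact_mod_cast by omega)]
      refine Or.inr ⟨B, J, rfl, hB, hJ1, by omega, hzJ, ?_, ?_⟩
      · intro j' h1 h2
        rcases Nat.lt_or_ge j' j with h' | h'
        · exact hub j' h1 (by omega)
        · have : j' = j := by omega
          rw [this]; omega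
      · intro j' h1 h2
        rcases Nat.lt_or_ge j' j with h' | h'
        · exact hstr j' h1 (by omega)
        · have : j' = j := by omega
          rw [this]; omega

theorem pvFold_aux (rl : List Char) :
    ∀ (d : Nat) (a : Nat), 1 ≤ a → a ≤ rl.length → rl.length - a = d →
    ∀ st, pvInv rl (a - 1) st →
    pvInv rl (rl.length - 1)
      ((PySem.List.pyRange (a : Int) rl.length 1).foldl
        (fun (st : Int × Int) j =>
          let k := pvZscan rl rl.length j 0
          if 0 < k ∧ st.1 ≤ k then (k, j) else st) st) := by
  intro d
  induction d with
  | zero =>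
    intro a h1 h2 hd st hst
    have ha : a = rl.length := by omega
    rw [PySem.List.pyRange_one]
    have : ((rl.length : Int) - a).toNat = 0 := by omega
    rw [this]
    simpa [ha] using hst
  | succ m ih =>
    intro a h1 h2 hd st hst
    rw [PySem.List.pyRange_one_cons (by exact_mod_cast by omega)]
    rw [List.foldl_cons]
    have hstep := pvStep rl a h1 st hst
    have hcast : ((a : Int) + 1) = ((a + 1 : Nat) : Int) := by push_cast; ring
    rw [hcast]
    have := ih (a + 1) (by omega) (by omega) (by omega) _ (by simpa using hstep)
    rw [PySem.List.pyRange_one] at this ⊢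
    exact this

theorem pvFold_inv (rl : List Char) (hne : rl ≠ []) :
    pvInv rl (rl.length - 1)
      ((PySem.List.pyRange 1 rl.length 1).foldl
        (fun (st : Int × Int) j =>
          let k := pvZscan rl rl.length j 0
          if 0 < k ∧ st.1 ≤ k then (k, j) else st) (0, 0)) := by
  have hlen : 1 ≤ rl.length := by
    cases rl with
    | nil => simp at hne
    | cons a as => simp
  have := pvFold_aux rl (rl.length - 1) 1 (le_refl 1) hlen (by omega) (0, 0)
    (Or.inl ⟨rfl, by omega⟩)
  simpa using this

-- condition of A's inner loop, restated as a z-value bound on the reversed list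
theorem pvCond (l : List Char) (L' i' : Nat) (hL : 1 ≤ L') (hlt : i' + L' < l.length) :
    (PySem.List.slice l (some (i' : Int)) (some ((i' : Int) + (L' : Int))) =
      PySem.List.slice l (some (-(L' : Int))) none)
    ↔ L' ≤ pvZ l.reverse (l.length - i' - L') := by
  rw [PySem.List.slice_natCast_add, PySem.List.slice_from_neg_natCast l L' hL]
  exact pvBridge l i' L' hL hlt

-- A's inner loop finds nothing when every z-value in range is below the length searched
theorem pvInner_none (l : List Char) (L : Int) (hL : 1 ≤ L)
    (hz : ∀ j, 1 ≤ j → j ≤ l.length - 1 → pvZ l.reverse j < L.toNat) :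
    (PySem.List.pyRange 0 ((l.length : Int) - L) 1).findSome? (fun i =>
      if PySem.List.slice l (some i) (some (i + L)) = PySem.List.slice l (some (-L)) none ∧
          i + L < (l.length : Int) then
        (PySem.List.pyGet? l (i + L)).map (fun c => String.ofList [c])
      else none) = none := by
  apply List.findSome?_eq_none_iff.mpr
  intro i hi
  have hmem := PySem.List.mem_pyRange_one.mp hi
  rw [if_neg]
  rintro ⟨hc, -⟩
  have hi' : i = ((i.toNat : Nat) : Int) := by omega
  have hL' : L = ((L.toNat : Nat) : Int) := by omega
  rw [hi', hL', pvCond l L.toNat i.toNat (by omega) (by omega)] at hc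
  have := hz (l.length - i.toNat - L.toNat) (by omega) (by omega)
  omega

-- ===== VERDICT (by name: the statement is the Claim_ definition above) =====
theorem predictor_pattern_spec : Claim_equal_predictor_pattern := by
  intro s _
  show predictor_pattern s = predictor_pattern_alt s
  by_cases hnil : s.toList = []
  · simp only [predictor_pattern, predictor_pattern_alt, predictor_last, hnil]
    norm_num
    simp [hnil, PySem.List.pyGet?]
  · have hn1 : 1 ≤ s.toList.length := List.length_pos_of_ne_nil hnil
    have hInv := pvFold_inv s.toList.reverse (by simpa using hnil)
    rw [List.length_reverse] at hInv
    simp only [predictor_pattern, predictor_pattern_alt]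
    rcases hInv with ⟨hst, hall⟩ | ⟨B, J, hst, hB, hJ1, hJm, hzJ, hub, hstr⟩
    · -- no repeated suffix at all: A falls through, B takes the best_len = 0 branch
      rw [hst]
      rw [List.findSome?_eq_none_iff.mpr ?_]
      · rw [if_neg (by omega : ¬ ((s.toList.length : Int) = 0)), if_pos rfl]
        simp only [predictor_last, PySem.Str.pyGet?_eq, PySem.Chars.pyGet?_eq_listPyGet?]
      · intro L hL
        have hmem := pvMem_desc (s.toList.length - 1) ((s.toList.length : Int) - 1) (by omega) L hL
        exact pvInner_none s.toList L (by omega)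
          (fun j h1 h2 => by rw [hall j h1 h2]; omega)
    · -- a best repeat (length B, reversed position J) exists
      have hBle : B + J ≤ s.toList.length := by
        have h1 := pvLcp_le_left (s.toList.reverse.drop J) s.toList.reverse
        rw [List.length_drop, List.length_reverse] at h1
        rw [pvZ] at hzJ
        omega
      rw [hst]
      have hget : PySem.List.pyGet? s.toList ((s.toList.length : Int) - (J : Int)) =
          some (s.toList[s.toList.length - J]'(by omega)) := by
        rw [show ((s.toList.length : Int) - (J : Int)) = ((s.toList.length - J : Nat) : Int) by omega,
          PySem.List.pyGet?_natCast]
        exact List.getElem?_eq_getElem (by omega)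
      rw [pvFindSome_desc _ (String.ofList [s.toList[s.toList.length - J]'(by omega)])
          (s.toList.length - 1) ((s.toList.length : Int) - 1) (B : Int) (by omega)
          (by exact_mod_cast hB) (by omega) ?_ ?_]
      · rw [if_neg (by omega : ¬ ((s.toList.length : Int) = 0)),
          if_neg (by exact_mod_cast by omega : ¬ ((B : Int) = 0)), hget]
      · -- lengths above B: nothing found
        intro L hL1 hL2
        exact pvInner_none s.toList L (by omega)
          (fun j h1 h2 => by have := hub j h1 h2; omega)
      · -- length B: first hit at i₀ = n - J - B, the char after it is s[n - J]
        apply pvFindSome_asc _ _ (s.toList.length - B) 0 ((s.toList.length : Int) - (B : Int))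
          ((s.toList.length - J - B : Nat) : Int) (by omega) (by omega) (by omega) ?_ ?_
        · intro i hi1 hi2
          rw [if_neg]
          rintro ⟨hc, -⟩
          have hi' : i = ((i.toNat : Nat) : Int) := by omega
          rw [hi', pvCond s.toList B i.toNat (by omega) (by omega)] at hc
          have := hstr (s.toList.length - i.toNat - B) (by omega) (by omega)
          omega
        · rw [if_pos]
          · rw [show ((s.toList.length - J - B : Nat) : Int) + (B : Int) =
                ((s.toList.length : Int) - (J : Int)) by omega, hget]
            rfl
          · constructor
            · rw [pvCond s.toList B (s.toList.length - J - B) (by omega) (by omega)]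
              rw [show s.toList.length - (s.toList.length - J - B) - B = J by omega, hzJ]
            · omega
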